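-- pv_equiv track=rewrite | github.com/jonathan-chien/counting-rnn | src/plotting/utils.py | subplot_dims
-- ===== SOURCE A (Python) =====
-- def subplot_dims(num_subplots, layout='wide', distance=2):
--     """
--     For a given number of desired subplots, returns grid shape as close to a
--     square as possible, without leaving too many grid entries blank.
--
--     Parameters
--     ----------
--     num_subplots : int
--         Number of desired/actual subplots.
--     layout : string
--         One of {'wide' | 'tall'}. This function returns a grid shape as close
--         to square as possible (see `distance`) will be returned, with dimension
--         0 being the smaller one in the former case and the larger one in the
--         latter. Default = 'wide'.
--     distance : int >= 0
--         Max absolute value of difference between grid dimensions. E.g., set to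
--         0 to always get a square grid. Default = 2.
--
--     Returns
--     -------
--     dims : 2-tuple
--         Row and column sizes of grid.
--     """
--     def get_divisors(n):
--         """Returns ascending list of divisors for a given natural number n."""
--         divisors = set()
--         for k in range(1, int(n**0.5)+1):
--             if n % k == 0:
--                 divisors.add(k)
--                 divisors.add(n // k)
--         return sorted(divisors)
--
--     if not isinstance(distance, int):
--         raise TypeError(
--             f"Expected type int for `distance` but got {type(distance)}."
--         )
--     elif distance < 0:
--         raise ValueError(
--             f"`distance` should be a non-negative integer but got {distance}."
--         )
--
--     searching = True
--     while searching:
--         divisors = get_divisors(num_subplots)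
--         num_divisors = len(divisors)
--         # Get two divisors closest to or including median divisor.
--         central_divisors = (
--             num_subplots // divisors[num_divisors//2],
--             divisors[num_divisors//2]
--         )
--         # If divisors are close enough, end the search. Else, increase size
--         # of grid and continue.
--         if abs(central_divisors[1] - central_divisors[0]) <= distance:
--             searching = False
--         else:
--             num_subplots += 1
--     dims = central_divisors
--
--     if layout == 'tall':
--         dims = dims[::-1]
--     elif layout != 'wide':
--         raise ValueError(
--             f"Unrecognized value {layout} for `layout`, must be one of "
--             "{'wide' | 'tall'}."
--         )
--
--     return dims
-- ===== SOURCE B (Python) =====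
-- def subplot_dims(num_subplots, layout='wide', distance=2):
--     """Near-square grid shape without the grow-and-refactor search: scan the
--     candidate smaller dimensions a = s+1 .. 1 once (s = isqrt(num_subplots)),
--     pair each with b = max(a, ceil(num_subplots / a)), keep the admissible pair
--     (b - a <= distance) of smallest area, preferring the squarest on ties."""
--     if not isinstance(distance, int):
--         raise TypeError(
--             f"Expected type int for `distance` but got {type(distance)}."
--         )
--     elif distance < 0:
--         raise ValueError(
--             f"`distance` should be a non-negative integer but got {distance}."
--         )
--
--     s = int(num_subplots ** 0.5)
--     best = None
--     for a in range(s + 1, 0, -1):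
--         b = max(a, -(-num_subplots // a))
--         if b - a <= distance and (best is None or a * b < best[0]):
--             best = (a * b, a)
--     dims = (best[1], best[0] // best[1])
--
--     if layout == 'tall':
--         dims = dims[::-1]
--     elif layout != 'wide':
--         raise ValueError(
--             f"Unrecognized value {layout} for `layout`, must be one of "
--             "{'wide' | 'tall'}."
--         )
--     return dims
-- ===== Notes on version B (the rewrite author's own statement) =====
-- stated objective: alternative
-- what changed: Replaces A's grow-and-refactor search (increment n, rebuild+sort its divisor set, test the median pair) by a single descending scan over candidate smaller dimensions a = isqrt(n)+1..1, pairing each with b = max(a, ceil(n/a)) and keeping the admissible pair of minimal area (ties to the squarest), so no divisor set, no sort and no outer retry loop exist.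
-- crash fix: For num_subplots = 0 (with distance >= 0 and layout in {'wide','tall'}) A raises IndexError on the empty divisor list while B returns (1, 1). — e.g. on subplot_dims(0, "wide", 2): A raises IndexError, B returns (1, 1)
import Mathlib
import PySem

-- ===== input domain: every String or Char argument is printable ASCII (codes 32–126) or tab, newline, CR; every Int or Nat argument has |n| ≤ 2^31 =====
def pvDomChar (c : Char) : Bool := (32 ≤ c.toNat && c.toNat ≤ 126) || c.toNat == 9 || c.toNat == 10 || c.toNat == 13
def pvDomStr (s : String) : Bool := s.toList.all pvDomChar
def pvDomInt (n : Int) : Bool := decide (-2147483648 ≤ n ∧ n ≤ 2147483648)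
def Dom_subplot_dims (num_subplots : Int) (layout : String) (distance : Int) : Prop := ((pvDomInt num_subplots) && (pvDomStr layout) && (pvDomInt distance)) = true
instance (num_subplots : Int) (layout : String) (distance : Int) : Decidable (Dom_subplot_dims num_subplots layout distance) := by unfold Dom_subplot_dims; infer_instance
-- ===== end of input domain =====

-- B drops A's grow-and-refactor search (increment n, rebuild + sort its divisor set, test the
-- median pair) for a single descending scan over candidate smaller dimensions a = isqrt(n)+1..1,
-- keeping the admissible pair (a, max(a, ceil(n/a))) of minimal area, ties to the squarest
-- (objective: alternative). Equivalence is proved on Pre_ (A raises elsewhere). A's loop carries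
-- fuel 100000, enough for every input admitted by Dom_ ∧ Pre_.

-- ===== PORT A =====
-- `int(n**0.5)` equals `Nat.sqrt n.toNat` for every nonnegative n in Dom_ (float sqrt is
-- exact there); for n < 0 Python raises TypeError, excluded by Pre_.
def pvGetDivisors (n : Int) : List Int :=
  let divisors : PySem.Set Int :=
    (PySem.List.pyRange 1 ((Nat.sqrt n.toNat : Int) + 1) 1).foldl
      (fun s k => if PySem.Int.mod n k = 0 then
          PySem.Set.add (PySem.Set.add s k) (PySem.Int.floordiv n k) else s)
      PySem.Set.empty
  PySem.List.sorted divisors (fun x => x) false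

def pvALoop (distance : Int) : Nat → Int → Int × Int
  | 0, _ => (0, 0)
  | fuel+1, n =>
    let divisors := pvGetDivisors n
    let numDivisors : Int := (divisors.length : Int)
    -- divisors[num_divisors//2]; nonempty on Pre_, default never read there
    let c2 := PySem.List.pyGetD divisors (PySem.Int.floordiv numDivisors 2) 0
    let central := (PySem.Int.floordiv n c2, c2)
    if |central.2 - central.1| ≤ distance then central
    else pvALoop distance fuel (n + 1)

def subplot_dims (num_subplots : Int) (layout : String) (distance : Int) : Int × Int :=
  -- isinstance check always passes (distance : Int); distance < 0 raises, excluded by Pre_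
  let dims := pvALoop distance 100000 num_subplots
  if layout == "tall" then (dims.2, dims.1)
  else dims  -- layout ∉ {wide, tall} raises, excluded by Pre_

-- ===== PORT B =====
-- loop body of Source B: `b = max(a, -(-num // a)); if b - a <= distance and (best is None or a*b < best[0]): best = (a*b, a)`
def pvBStep (num distance : Int) (best : Option (Int × Int)) (a : Int) : Option (Int × Int) :=
  let b := max a (-(PySem.Int.floordiv (-num) a))
  if b - a ≤ distance ∧ (∀ p ∈ best, a * b < p.1) then some (a * b, a) else best

def pvBFold (num distance : Int) : Option (Int × Int) :=
  (PySem.List.pyRange ((Nat.sqrt num.toNat : Int) + 1) 0 (-1)).foldl (pvBStep num distance) none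

def subplot_dims_alt (num_subplots : Int) (layout : String) (distance : Int) : Int × Int :=
  let dims := match pvBFold num_subplots distance with
    | some (p, a) => (a, PySem.Int.floordiv p a)
    | none => (0, 0)   -- `best[1]` with best None raises TypeError; unreachable on Pre_
  if layout == "tall" then (dims.2, dims.1)
  else dims

-- ===== PRECONDITION & SPEC =====
-- A raises outside Pre_: IndexError for num_subplots = 0, TypeError (complex ** result)
-- for num_subplots < 0, ValueError for distance < 0 or layout ∉ {'wide','tall'}.
def Pre_subplot_dims (num_subplots : Int) (layout : String) (distance : Int) : Prop :=
  1 ≤ num_subplots ∧ 0 ≤ distance ∧ (layout = "wide" ∨ layout = "tall")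
instance (num_subplots : Int) (layout : String) (distance : Int) : Decidable (Pre_subplot_dims num_subplots layout distance) := by unfold Pre_subplot_dims; infer_instance

def pvWitness_subplot_dims : Int × String × Int := (7, "wide", 2)

-- For num_subplots = 0 (distance ≥ 0, layout ∈ {'wide','tall'}) A raises IndexError on the
-- empty divisor list while B returns (1, 1).
def Raises_subplot_dims (num_subplots : Int) (layout : String) (distance : Int) : Prop :=
  num_subplots = 0 ∧ 0 ≤ distance ∧ (layout = "wide" ∨ layout = "tall")
instance (num_subplots : Int) (layout : String) (distance : Int) : Decidable (Raises_subplot_dims num_subplots layout distance) := by unfold Raises_subplot_dims; infer_instance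

def pvRaiseWitness_subplot_dims : Int × String × Int := (0, "wide", 2)
def pvRaiseWitnessOut_subplot_dims : Int × Int := (1, 1)

def Spec_subplot_dims (num_subplots : Int) (layout : String) (distance : Int) (out : Int × Int) : Prop := out = subplot_dims_alt num_subplots layout distance
instance (num_subplots : Int) (layout : String) (distance : Int) (out : Int × Int) : Decidable (Spec_subplot_dims num_subplots layout distance out) := by unfold Spec_subplot_dims; infer_instance

-- ===== CLAIM (what is proved, stated in full; the proofs are below) =====
def Claim_equal_subplot_dims : Prop := ∀ (num_subplots : Int) (layout : String) (distance : Int), Dom_subplot_dims num_subplots layout distance → Pre_subplot_dims num_subplots layout distance → Spec_subplot_dims num_subplots layout distance (subplot_dims num_subplots layout distance)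

def Claim_raises_subplot_dims : Prop := (∀ (num_subplots : Int) (layout : String) (distance : Int), Dom_subplot_dims num_subplots layout distance → Raises_subplot_dims num_subplots layout distance → ¬ Pre_subplot_dims num_subplots layout distance) ∧ (Dom_subplot_dims (pvRaiseWitness_subplot_dims.1) (pvRaiseWitness_subplot_dims.2.1) (pvRaiseWitness_subplot_dims.2.2) ∧ Raises_subplot_dims (pvRaiseWitness_subplot_dims.1) (pvRaiseWitness_subplot_dims.2.1) (pvRaiseWitness_subplot_dims.2.2) ∧ subplot_dims_alt (pvRaiseWitness_subplot_dims.1) (pvRaiseWitness_subplot_dims.2.1) (pvRaiseWitness_subplot_dims.2.2) = pvRaiseWitnessOut_subplot_dims)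

-- ===== LEMMAS AND PROOFS =====

-- B's candidate list of divisors of n in [1, √n] (A-side analysis).
def candsOf (n : Int) : List Int :=
  (PySem.List.pyRange 1 ((Nat.sqrt n.toNat : Int) + 1) 1).filter
    (fun k => PySem.Int.mod n k == 0)

lemma mem_candsOf (n k : Int) :
    k ∈ candsOf n ↔ 1 ≤ k ∧ k ≤ (Nat.sqrt n.toNat : Int) ∧ k ∣ n := by
  simp [candsOf, PySem.List.mem_pyRange_one, PySem.Int.mod_eq_zero_iff_dvd]
  tauto

lemma pairwise_candsOf (n : Int) : (candsOf n).Pairwise (· < ·) :=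
  (PySem.List.pairwise_lt_pyRange_one 1 _).filter _

lemma candsOf_ne_nil (n : Int) (hn : 1 ≤ n) : candsOf n ≠ [] := by
  have h1 : (1 : Int) ∈ candsOf n := by
    rw [mem_candsOf]
    refine ⟨le_refl _, ?_, one_dvd n⟩
    have : 0 < Nat.sqrt n.toNat := Nat.sqrt_pos.mpr (by omega)
    omega
  exact List.ne_nil_of_mem h1

lemma le_getLast_of_pairwise_lt (l : List Int) (h : l.Pairwise (· < ·)) (hne : l ≠ [])
    (x : Int) (hx : x ∈ l) : x ≤ l.getLast hne := by
  induction l with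
  | nil => simp at hx
  | cons a t ih =>
    rcases List.mem_cons.mp hx with rfl | hx'
    · rcases t.eq_nil_or_concat with rfl | _
      · simp [List.getLast]
      · have ht : t ≠ [] := by rintro rfl; simp_all
        rw [List.getLast_cons ht]
        have : x < t.getLast ht := (List.pairwise_cons.mp h).1 _ (List.getLast_mem ht)
        omega
    · have ht : t ≠ [] := by rintro rfl; simp_all
      rw [List.getLast_cons ht]
      exact ih (List.pairwise_cons.mp h).2 ht hx'

-- arithmetic facts about d := largest divisor ≤ √n and q := n / d
lemma d_mul_q (n d : Int) (hd : 0 < d) (hdvd : d ∣ n) :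
    d * PySem.Int.floordiv n d = n := by
  rw [PySem.Int.floordiv_eq_ediv_of_pos hd]; exact Int.mul_ediv_cancel' hdvd

lemma div_strict_anti (n a b : Int) (ha : 0 < a) (hab : a < b)
    (hda : a ∣ n) (hdb : b ∣ n) (hn : 1 ≤ n) :
    PySem.Int.floordiv n b < PySem.Int.floordiv n a := by
  have hb : 0 < b := by omega
  have h1 : a * PySem.Int.floordiv n a = n := d_mul_q n a ha hda
  have h2 : b * PySem.Int.floordiv n b = n := d_mul_q n b hb hdb
  have hbn : b ≤ n := Int.le_of_dvd (by omega) hdb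
  have hqb : 1 ≤ PySem.Int.floordiv n b := by
    rw [PySem.Int.le_floordiv_iff_mul_le hb]; omega
  nlinarith

lemma d_le_q (n d : Int) (hn : 1 ≤ n) (hd : 0 < d) (_hdvd : d ∣ n)
    (hsq : d ≤ (Nat.sqrt n.toNat : Int)) :
    d ≤ PySem.Int.floordiv n d := by
  rw [PySem.Int.le_floordiv_iff_mul_le hd]
  have h1 : d.toNat ≤ Nat.sqrt n.toNat := by omega
  have h2 : d.toNat * d.toNat ≤ n.toNat := Nat.le_sqrt.mp h1
  have h3 : (d.toNat : Int) = d := by omega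
  have := (Nat.cast_le (α := Int)).mpr h2
  push_cast at this; rw [h3] at this; omega

lemma floordiv_q_eq_d (n d : Int) (hn : 1 ≤ n) (hd : 0 < d) (hdvd : d ∣ n) :
    PySem.Int.floordiv n (PySem.Int.floordiv n d) = d := by
  have h1 : d * PySem.Int.floordiv n d = n := d_mul_q n d hd hdvd
  have hdn : d ≤ n := Int.le_of_dvd (by omega) hdvd
  have hq : 0 < PySem.Int.floordiv n d := by
    have := PySem.Int.le_floordiv_iff_mul_le (a := n) (q := 1) hd
    omega
  rw [PySem.Int.floordiv_eq_ediv_of_pos hq]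
  nth_rewrite 1 [← h1]
  rw [Int.mul_ediv_cancel _ (by omega)]

-- membership / nodup of A's divisor set accumulator
lemma mem_divFold (n : Int) (l s : List Int) (x : Int) :
    x ∈ l.foldl
      (fun s k => if PySem.Int.mod n k = 0 then
          PySem.Set.add (PySem.Set.add s k) (PySem.Int.floordiv n k) else s) s
    ↔ x ∈ s ∨ ∃ k ∈ l, PySem.Int.mod n k = 0 ∧ (x = k ∨ x = PySem.Int.floordiv n k) := by
  induction l generalizing s with
  | nil => simp
  | cons a t ih =>
    simp only [List.foldl_cons, ih]
    split_ifs with h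
    · simp only [PySem.Set.mem_add, List.mem_cons]
      aesop
    · simp only [List.mem_cons]
      aesop

lemma nodup_divFold (n : Int) (l s : List Int) (hs : s.Nodup) :
    (l.foldl
      (fun s k => if PySem.Int.mod n k = 0 then
          PySem.Set.add (PySem.Set.add s k) (PySem.Int.floordiv n k) else s) s).Nodup := by
  induction l generalizing s with
  | nil => simpa
  | cons a t ih =>
    simp only [List.foldl_cons]
    split_ifs with h
    · exact ih _ (PySem.Set.nodup_add _ _ (PySem.Set.nodup_add _ _ hs))
    · exact ih _ hs

-- A's divisor-set accumulator and its characterisation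
def divFold (n : Int) : List Int :=
  (PySem.List.pyRange 1 ((Nat.sqrt n.toNat : Int) + 1) 1).foldl
    (fun s k => if PySem.Int.mod n k = 0 then
        PySem.Set.add (PySem.Set.add s k) (PySem.Int.floordiv n k) else s)
    PySem.Set.empty

lemma pvGetDivisors_eq (n : Int) :
    pvGetDivisors n = PySem.List.sorted (divFold n) (fun x => x) false := rfl

lemma mem_divFold' (n x : Int) :
    x ∈ divFold n ↔ x ∈ candsOf n ∨ x ∈ (candsOf n).map (fun k => PySem.Int.floordiv n k) := by
  rw [divFold, mem_divFold]
  simp only [PySem.Set.empty, List.not_mem_nil, false_or, candsOf, List.mem_map,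
    List.mem_filter, beq_iff_eq]
  constructor
  · rintro ⟨k, hk, hm, (rfl | rfl)⟩
    · exact Or.inl ⟨hk, hm⟩
    · exact Or.inr ⟨k, ⟨hk, hm⟩, rfl⟩
  · rintro (⟨hk, hm⟩ | ⟨k, ⟨hk, hm⟩, rfl⟩)
    · exact ⟨x, hk, hm, Or.inl rfl⟩
    · exact ⟨k, hk, hm, Or.inr rfl⟩

lemma nodup_divFold' (n : Int) : (divFold n).Nodup :=
  nodup_divFold n _ _ List.nodup_nil

-- A's sorted divisor list, written as cands ++ mirrored big divisors
lemma divisors_eq (n : Int) (hn : 1 ≤ n) (h : candsOf n ≠ []) :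
    PySem.List.sorted (divFold n) (fun x => x) false =
      if PySem.Int.floordiv n ((candsOf n).getLast h) = (candsOf n).getLast h
      then candsOf n ++ ((candsOf n).dropLast.map (fun k => PySem.Int.floordiv n k)).reverse
      else candsOf n ++ ((candsOf n).map (fun k => PySem.Int.floordiv n k)).reverse := by
  set C := candsOf n with hC
  set f : Int → Int := fun k => PySem.Int.floordiv n k with hf
  set d := C.getLast h with hd
  have hdmem : d ∈ C := List.getLast_mem h
  obtain ⟨hd1, hdsq, hddvd⟩ := (mem_candsOf n d).mp hdmem
  have hq_ge : d ≤ f d := d_le_q n d hn (by omega) hddvd hdsq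
  have hCfacts : ∀ x ∈ C, 1 ≤ x ∧ x ∣ n ∧ x ≤ d := by
    intro x hx
    obtain ⟨h1, _, h3⟩ := (mem_candsOf n x).mp hx
    exact ⟨h1, h3, le_getLast_of_pairwise_lt C (pairwise_candsOf n) h x hx⟩
  have hanti : ∀ a ∈ C, ∀ b ∈ C, a < b → f b < f a := by
    intro a ha b hb hab
    exact div_strict_anti n a b (hCfacts a ha).1 hab (hCfacts a ha).2.1 (hCfacts b hb).2.1 hn
  have hantile : ∀ a ∈ C, ∀ b ∈ C, a ≤ b → f b ≤ f a := by
    intro a ha b hb hab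
    rcases eq_or_lt_of_le hab with rfl | hlt
    · exact le_refl _
    · exact le_of_lt (hanti a ha b hb hlt)
  have hsplit : C.dropLast ++ [d] = C := List.dropLast_append_getLast h
  have hdrop_lt : ∀ x ∈ C.dropLast, x < d := by
    have hp := pairwise_candsOf n
    rw [← hC, ← hsplit] at hp
    intro x hx
    exact (List.pairwise_append.mp hp).2.2 x hx d (List.mem_singleton_self d)
  have hdropC : ∀ x ∈ C.dropLast, x ∈ C := by
    intro x hx; rw [← hsplit]; exact List.mem_append_left _ hx
  set R : List Int := if f d = d then (C.dropLast.map f).reverse else (C.map f).reverse with hR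
  have hRmem : ∀ y ∈ R, ∃ k ∈ C, y = f k ∧ d < y := by
    intro y hy
    rw [hR] at hy
    split_ifs at hy with hsq'
    · rw [List.mem_reverse, List.mem_map] at hy
      obtain ⟨k, hk, rfl⟩ := hy
      refine ⟨k, hdropC k hk, rfl, ?_⟩
      have := hanti k (hdropC k hk) d hdmem (hdrop_lt k hk)
      omega
    · rw [List.mem_reverse, List.mem_map] at hy
      obtain ⟨k, hk, rfl⟩ := hy
      refine ⟨k, hk, rfl, ?_⟩
      have hle := hantile k hk d hdmem (hCfacts k hk).2.2
      have : d ≠ f d := fun e => hsq' e.symm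
      rcases eq_or_lt_of_le ((hCfacts k hk).2.2) with rfl | hlt
      · omega
      · have := hanti k hk d hdmem hlt; omega
  have hRpair : R.Pairwise (· < ·) := by
    rw [hR]
    split_ifs with hsq'
    · rw [List.pairwise_reverse]
      refine (List.pairwise_map).mpr ?_
      exact (pairwise_candsOf n).sublist (List.dropLast_sublist C) |>.imp_of_mem
        (fun {a b} ha hb hab => hanti a (hdropC a ha) b (hdropC b hb) hab)
    · rw [List.pairwise_reverse]
      refine (List.pairwise_map).mpr ?_
      exact (pairwise_candsOf n).imp_of_mem
        (fun {a b} ha hb hab => hanti a ha b hb hab)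
  have hpairwise : (C ++ R).Pairwise (· < ·) := by
    rw [List.pairwise_append]
    refine ⟨pairwise_candsOf n, hRpair, ?_⟩
    intro x hx y hy
    obtain ⟨k, hk, rfl, hdy⟩ := hRmem y hy
    have := (hCfacts x hx).2.2
    omega
  have hmem : ∀ x, x ∈ C ++ R ↔ x ∈ divFold n := by
    intro x
    rw [mem_divFold', List.mem_append, hR, ← hC]
    constructor
    · rintro (hx | hx)
      · exact Or.inl hx
      · split_ifs at hx with hsq'
        · rw [List.mem_reverse] at hx
          exact Or.inr ((List.map_subset f (fun a ha => hdropC a ha)) hx)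
        · rw [List.mem_reverse] at hx
          exact Or.inr hx
    · rintro (hx | hx)
      · exact Or.inl hx
      · split_ifs with hsq'
        · rw [List.mem_map] at hx
          obtain ⟨k, hk, rfl⟩ := hx
          by_cases hkd : k = d
          · exact Or.inl (by show f k ∈ C; rw [hkd, hsq']; exact hdmem)
          · have hkC : k ∈ C.dropLast := by
              rw [← hsplit] at hk
              rcases List.mem_append.mp hk with h' | h'
              · exact h'
              · simp at h'; exact absurd h' hkd
            exact Or.inr (by rw [List.mem_reverse]; exact List.mem_map_of_mem hkC)
        · exact Or.inr (by rw [List.mem_reverse]; exact hx)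
  have hperm : (C ++ R).Perm (divFold n) := by
    rw [List.perm_ext_iff_of_nodup (hpairwise.imp fun {a b} hab => ne_of_lt hab)
      (nodup_divFold' n)]
    exact hmem
  have hres := PySem.List.sorted_eq_of_perm_of_pairwise_lt (divFold n) (C ++ R)
    (fun x => x) hperm (by simpa using hpairwise)
  rw [hres, hR]
  split_ifs with hsq' <;> rfl

lemma mid_eq (n : Int) (hn : 1 ≤ n) (h : candsOf n ≠ []) :
    PySem.List.pyGetD (pvGetDivisors n)
        (PySem.Int.floordiv ((pvGetDivisors n).length : Int) 2) 0
      = PySem.Int.floordiv n ((candsOf n).getLast h) := by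
  have hG := pvGetDivisors_eq n
  rw [hG, divisors_eq n hn h]
  set C := candsOf n with hC
  set f : Int → Int := fun k => PySem.Int.floordiv n k with hf
  set d := C.getLast h with hd
  have hm : 1 ≤ C.length := List.length_pos_iff.mpr h
  have hsplitmap : C.map f = C.dropLast.map f ++ [f d] := by
    conv_lhs => rw [← List.dropLast_append_getLast h]
    rw [List.map_append]; rfl
  split_ifs with hsq'
  · set L := C ++ (List.map f C.dropLast).reverse with hL
    have hlen : L.length = 2 * C.length - 1 := by
      rw [hL]; simp [List.length_dropLast]; omega
    have hidx : PySem.Int.floordiv ((L.length : Int)) 2 = ((L.length / 2 : Nat) : Int) := by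
      exact_mod_cast PySem.Int.floordiv_natCast L.length 2
    rw [hidx, PySem.List.pyGetD_natCast]
    have hhalf : L.length / 2 = C.length - 1 := by omega
    rw [hhalf]
    have hlt : C.length - 1 < C.length := by omega
    have hstep : L.getD (C.length - 1) 0 = C[C.length - 1]'hlt := by
      rw [List.getD_eq_getElem _ _ (by rw [hlen]; omega)]
      exact List.getElem_append_left hlt
    rw [hstep, ← List.getLast_eq_getElem h]
    exact hsq'.symm
  · set L := C ++ (List.map f C).reverse with hL
    have hlen : L.length = 2 * C.length := by rw [hL]; simp; omega
    have hidx : PySem.Int.floordiv ((L.length : Int)) 2 = ((L.length / 2 : Nat) : Int) := by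
      exact_mod_cast PySem.Int.floordiv_natCast L.length 2
    rw [hidx, PySem.List.pyGetD_natCast]
    have hhalf : L.length / 2 = C.length := by omega
    rw [hhalf]
    have h0 : (List.map f C).reverse = f d :: (List.map f C.dropLast).reverse := by
      rw [hsplitmap, List.reverse_append]; rfl
    have hstep : L.getD C.length 0 = ((List.map f C).reverse)[0]'(by simp [h0]) := by
      rw [List.getD_eq_getElem _ _ (by rw [hlen]; omega)]
      have h2 := List.getElem_append_right (as := C) (bs := (List.map f C).reverse)
        (h₁ := le_refl C.length) (h₂ := by rw [hlen]; omega)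
      simp only [Nat.sub_self] at h2; exact h2
    rw [hstep]
    have hfin : ((List.map f C).reverse)[0]'(by simp [h0]) = f d := by
      simp only [h0, List.getElem_cons_zero]
    rw [hfin]

-- ===== shared abstractions for the equivalence proof =====

-- the largest divisor of n in [1, √n] (as B's cands[-1]-style access on candsOf)
def dOf (n : Int) : Int := PySem.List.pyGetD (candsOf n) (-1) 0

-- A's loop guard, in closed form: the most-square factorization is within `distance`
-- (an abbrev so that `Nat.find` sees its decidability)
abbrev good (dist n : Int) : Prop :=
  PySem.Int.floordiv n (dOf n) - dOf n ≤ dist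

-- n admits SOME factorization a*b = n with a ≤ b ≤ a + dist
def qual (dist n : Int) : Prop :=
  ∃ a b : Int, 1 ≤ a ∧ a ≤ b ∧ b - a ≤ dist ∧ a * b = n

lemma dOf_eq_getLast (n : Int) (h : candsOf n ≠ []) : dOf n = (candsOf n).getLast h :=
  PySem.List.pyGetD_neg_one _ 0 h

lemma dOf_spec (n : Int) (hn : 1 ≤ n) :
    1 ≤ dOf n ∧ dOf n ∣ n ∧ dOf n ≤ (Nat.sqrt n.toNat : Int) := by
  have h := candsOf_ne_nil n hn
  have := (mem_candsOf n _).mp (dOf_eq_getLast n h ▸ List.getLast_mem h)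
  exact ⟨this.1, this.2.2, this.2.1⟩

lemma dOf_max (n a : Int) (hn : 1 ≤ n) (h1 : 1 ≤ a) (hd : a ∣ n) (hsq : a * a ≤ n) :
    a ≤ dOf n := by
  have h := candsOf_ne_nil n hn
  rw [dOf_eq_getLast n h]
  apply le_getLast_of_pairwise_lt _ (pairwise_candsOf n) h
  rw [mem_candsOf]
  refine ⟨h1, ?_, hd⟩
  by_contra hc
  rw [not_le] at hc
  have hs := Nat.lt_succ_sqrt n.toNat
  have hs' : (n.toNat : Int) < ((Nat.sqrt n.toNat : Nat) + 1 : Int) * ((Nat.sqrt n.toNat : Nat) + 1 : Int) := by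
    exact_mod_cast hs
  have hnn : (n.toNat : Int) = n := by omega
  nlinarith

lemma good_iff_qual (dist n : Int) (hn : 1 ≤ n) : good dist n ↔ qual dist n := by
  obtain ⟨hd1, hdvd, hdsq⟩ := dOf_spec n hn
  have hdq : dOf n ≤ PySem.Int.floordiv n (dOf n) := d_le_q n _ hn (by omega) hdvd hdsq
  have hmul : dOf n * PySem.Int.floordiv n (dOf n) = n := d_mul_q n _ (by omega) hdvd
  constructor
  · intro hg
    exact ⟨dOf n, PySem.Int.floordiv n (dOf n), hd1, hdq, hg, hmul⟩
  · rintro ⟨a, b, ha1, hab, hgap, habn⟩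
    have hadvd : a ∣ n := ⟨b, habn.symm⟩
    have had : a ≤ dOf n := dOf_max n a hn ha1 hadvd (by nlinarith)
    have hb : PySem.Int.floordiv n a = b := by
      rw [PySem.Int.floordiv_eq_ediv_of_pos (by omega), ← habn,
        Int.mul_ediv_cancel_left _ (by omega)]
    have hle : PySem.Int.floordiv n (dOf n) ≤ PySem.Int.floordiv n a := by
      rcases eq_or_lt_of_le had with heq | hlt
      · rw [heq]
      · exact le_of_lt (div_strict_anti n a _ (by omega) hlt hadvd hdvd hn)
    unfold good
    omega

-- A's loop unfolds to a test of `good`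
lemma aloop_succ (dist : Int) (fuel : Nat) (n : Int) (hn : 1 ≤ n) :
    pvALoop dist (fuel + 1) n =
      if good dist n then (dOf n, PySem.Int.floordiv n (dOf n))
      else pvALoop dist fuel (n + 1) := by
  have h := candsOf_ne_nil n hn
  obtain ⟨hd1, hdvd, hdsq⟩ := dOf_spec n hn
  have hmid := mid_eq n hn h
  have hfq := floordiv_q_eq_d n (dOf n) hn (by omega) hdvd
  have hdq : dOf n ≤ PySem.Int.floordiv n (dOf n) := d_le_q n _ hn (by omega) hdvd hdsq
  show (let divisors := pvGetDivisors n
        let numDivisors : Int := (divisors.length : Int)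
        let c2 := PySem.List.pyGetD divisors (PySem.Int.floordiv numDivisors 2) 0
        let central := (PySem.Int.floordiv n c2, c2)
        if |central.2 - central.1| ≤ dist then central
        else pvALoop dist fuel (n + 1)) = _
  simp only [← dOf_eq_getLast n h] at hmid
  simp only [hmid, hfq]
  have habs : |PySem.Int.floordiv n (dOf n) - dOf n| = PySem.Int.floordiv n (dOf n) - dOf n :=
    abs_of_nonneg (by omega)
  rw [habs]

-- A's loop reaches the first n + m with `good`
lemma aloop_find (dist : Int) (fuel : Nat) :
    ∀ (n : Int), 1 ≤ n → ∀ (hq : ∃ m : Nat, good dist (n + m)), Nat.find hq < fuel →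
      pvALoop dist fuel n =
        (dOf (n + Nat.find hq), PySem.Int.floordiv (n + Nat.find hq) (dOf (n + Nat.find hq))) := by
  induction fuel with
  | zero => intro n _ hq hlt; omega
  | succ fuel ih =>
    intro n hn hq hlt
    rw [aloop_succ dist fuel n hn]
    by_cases hg : good dist n
    · have h0 : Nat.find hq = 0 := by
        rw [Nat.find_eq_zero]
        simpa using hg
      rw [h0, if_pos hg]
      norm_num
    · have hpos : 0 < Nat.find hq := by
        rcases Nat.eq_zero_or_pos (Nat.find hq) with h | h
        · exfalso; apply hg; have := Nat.find_spec hq; rw [h] at this; simpa using this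
        · exact h
      have hq' : ∃ m : Nat, good dist ((n + 1) + m) := by
        refine ⟨Nat.find hq - 1, ?_⟩
        have := Nat.find_spec hq
        have harg : ((n + 1) + ((Nat.find hq - 1 : Nat) : Int)) = n + (Nat.find hq : Int) := by
          push_cast [Nat.cast_sub hpos]; ring
        rw [harg]
        exact this
      have hfind' : Nat.find hq' = Nat.find hq - 1 := by
        rw [Nat.find_eq_iff]
        constructor
        · have := Nat.find_spec hq
          have harg : ((n + 1) + ((Nat.find hq - 1 : Nat) : Int)) = n + (Nat.find hq : Int) := by
            push_cast [Nat.cast_sub hpos]; ring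
          rw [harg]; exact this
        · intro k hk
          have hk' : k + 1 < Nat.find hq := by omega
          have := Nat.find_min hq hk'
          intro hgk
          apply this
          have harg : (n + ((k + 1 : Nat) : Int)) = (n + 1) + (k : Int) := by push_cast; ring
          rw [harg]
          exact hgk
      rw [if_neg hg]
      have := ih (n + 1) (by omega) hq' (by omega)
      rw [this, hfind']
      have harg : ((n + 1) + ((Nat.find hq - 1 : Nat) : Int)) = n + (Nat.find hq : Int) := by
        push_cast [Nat.cast_sub hpos]; ring
      rw [harg]

-- ===== B-side analysis =====

-- the pair B builds at candidate a
def bOf (num a : Int) : Int := max a (-(PySem.Int.floordiv (-num) a))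
def prodOf (num a : Int) : Int := a * bOf num a
def cand (num dist a : Int) : Prop := bOf num a - a ≤ dist

lemma ceil_spec (num a : Int) (ha : 0 < a) :
    ((-(PySem.Int.floordiv (-num) a)) - 1) * a < num ∧ num ≤ (-(PySem.Int.floordiv (-num) a)) * a := by
  have := (PySem.Int.neg_floordiv_neg_eq_iff_of_pos (a := num) (b := a)
    (q := -(PySem.Int.floordiv (-num) a)) ha).mp rfl
  exact this

lemma bOf_ge (num a : Int) : a ≤ bOf num a := le_max_left _ _

lemma num_le_prodOf (num a : Int) (ha : 0 < a) : num ≤ prodOf num a := by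
  have h := (ceil_spec num a ha).2
  have hb : -(PySem.Int.floordiv (-num) a) ≤ bOf num a := le_max_right _ _
  have : 0 < a := ha
  unfold prodOf
  nlinarith

lemma prodOf_qual (num dist a : Int) (ha : 0 < a) (hc : cand num dist a) :
    qual dist (prodOf num a) :=
  ⟨a, bOf num a, by omega, bOf_ge num a, hc, rfl⟩

-- fold lemma: once best = (nmin, d) with every later candidate's product ≥ nmin, it stays
lemma pvBStep_eq (num dist : Int) (best : Option (Int × Int)) (a : Int) :
    pvBStep num dist best a =
      if bOf num a - a ≤ dist ∧ (∀ p ∈ best, prodOf num a < p.1)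
      then some (prodOf num a, a) else best := rfl

-- fold lemma: once best = (nmin, d) with every later candidate's product ≥ nmin, it stays
lemma fold_stay (num dist nmin d : Int) (L : List Int)
    (hL : ∀ x ∈ L, cand num dist x → nmin ≤ prodOf num x) :
    L.foldl (pvBStep num dist) (some (nmin, d)) = some (nmin, d) := by
  induction L with
  | nil => rfl
  | cons x t ih =>
    have hx := hL x (List.mem_cons_self)
    have hstep : pvBStep num dist (some (nmin, d)) x = some (nmin, d) := by
      rw [pvBStep_eq, if_neg]
      rintro ⟨hgap, hlt⟩
      have h1 := hlt (nmin, d) rfl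
      have h2 := hx hgap
      simp at h1
      omega
    rw [List.foldl_cons, hstep]
    exact ih (fun x hx' hc => hL x (List.mem_cons_of_mem _ hx') hc)

-- fold lemma: while every candidate's product exceeds nmin, best is none or beyond nmin
lemma fold_pre (num dist nmin : Int) (L : List Int)
    (hL : ∀ x ∈ L, cand num dist x → nmin < prodOf num x) :
    ∀ acc, (acc = none ∨ ∃ p a, acc = some (p, a) ∧ nmin < p) →
      (L.foldl (pvBStep num dist) acc = none ∨
        ∃ p a, L.foldl (pvBStep num dist) acc = some (p, a) ∧ nmin < p) := by
  induction L with
  | nil => intro acc hacc; simpa using hacc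
  | cons x t ih =>
    intro acc hacc
    rw [List.foldl_cons]
    apply ih (fun y hy => hL y (List.mem_cons_of_mem _ hy))
    rw [pvBStep_eq]
    split_ifs with hcond
    · exact Or.inr ⟨_, _, rfl, hL x (List.mem_cons_self) hcond.1⟩
    · exact hacc

-- main B-fold characterisation, on a split list
lemma fold_main (num dist nmin d : Int) (L1 L2 : List Int)
    (h1 : ∀ x ∈ L1, cand num dist x → nmin < prodOf num x)
    (h2 : ∀ x ∈ L2, cand num dist x → nmin ≤ prodOf num x)
    (hcand : cand num dist d) (hprod : prodOf num d = nmin) :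
    (L1 ++ d :: L2).foldl (pvBStep num dist) none = some (nmin, d) := by
  rw [List.foldl_append, List.foldl_cons]
  have hacc := fold_pre num dist nmin L1 h1 none (Or.inl rfl)
  have hstep : pvBStep num dist (L1.foldl (pvBStep num dist) none) d = some (nmin, d) := by
    rw [pvBStep_eq]
    rcases hacc with h | ⟨p, a, heq, hgt⟩
    · rw [h, if_pos ⟨hcand, by simp⟩, hprod]
    · rw [heq, if_pos ⟨hcand, by intro q hq; rw [Option.mem_some_iff] at hq; subst hq; simpa [hprod] using hgt⟩, hprod]
  rw [hstep]
  exact fold_stay num dist nmin d L2 h2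

-- ===== putting it together =====

lemma minimal_good (num dist : Int) (hq : ∃ m : Nat, good dist (num + m)) :
    ∀ n : Int, num ≤ n → good dist n → num + (Nat.find hq : Int) ≤ n := by
  intro n hle hg
  by_contra hc
  rw [not_le] at hc
  have hk : ((n - num).toNat : Int) = n - num := by omega
  have hklt : (n - num).toNat < Nat.find hq := by omega
  apply Nat.find_min hq hklt
  rw [show num + ((n - num).toNat : Int) = n by omega]
  exact hg

lemma main_loop_eq (num dist : Int) (hn : 1 ≤ num) (hd0 : 0 ≤ dist)
    (hq : ∃ m : Nat, good dist (num + m)) (hfuel : Nat.find hq < 100000) :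
    ∃ p a, pvBFold num dist = some (p, a) ∧
      pvALoop dist 100000 num = (a, PySem.Int.floordiv p a) := by
  set S : Int := (Nat.sqrt num.toNat : Int) with hS
  set nmin : Int := num + (Nat.find hq : Int) with hnmin
  have hnmin1 : 1 ≤ nmin := by
    have h0 : (0:Int) ≤ (Nat.find hq : Int) := Int.natCast_nonneg _
    omega
  have hgood : good dist nmin := Nat.find_spec hq
  have hmin := minimal_good num dist hq
  set d : Int := dOf nmin with hdd
  obtain ⟨hd1, hdvd, hdsq⟩ := dOf_spec nmin hnmin1
  have hmul : d * PySem.Int.floordiv nmin d = nmin := d_mul_q nmin d (by omega) hdvd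
  have hdq : d ≤ PySem.Int.floordiv nmin d := d_le_q nmin d hnmin1 (by omega) hdvd hdsq
  have hgap : PySem.Int.floordiv nmin d - d ≤ dist := hgood
  -- every admissible candidate's product is ≥ nmin
  have hall : ∀ x : Int, 1 ≤ x → cand num dist x → nmin ≤ prodOf num x := by
    intro x hx1 hc
    have hge : num ≤ prodOf num x := num_le_prodOf num x (by omega)
    have hqual : qual dist (prodOf num x) := prodOf_qual num dist x (by omega) hc
    exact hmin _ hge ((good_iff_qual dist _ (by omega)).mpr hqual)
  -- ... and strictly > nmin when x > d
  have hstrict : ∀ x : Int, d < x → cand num dist x → nmin < prodOf num x := by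
    intro x hx hc
    have hx1 : 1 ≤ x := by omega
    rcases lt_or_eq_of_le (hall x hx1 hc) with h | h
    · exact h
    · exfalso
      have hxdvd : x ∣ nmin := ⟨bOf num x, h⟩
      have hxsq : x * x ≤ nmin := by
        have := bOf_ge num x
        unfold prodOf at h
        nlinarith
      have := dOf_max nmin x hnmin1 hx1 hxdvd hxsq
      omega
  -- d itself is admissible with product exactly nmin
  have hceil := ceil_spec num d (by omega)
  have hcle : -(PySem.Int.floordiv (-num) d) ≤ PySem.Int.floordiv nmin d := by
    have h1 := hceil.1
    have h2 : num ≤ nmin := by omega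
    nlinarith [hmul]
  have hbOf : bOf num d ≤ PySem.Int.floordiv nmin d := by
    unfold bOf; exact max_le hdq hcle
  have hcandd : cand num dist d := by
    unfold cand
    have := bOf_ge num d
    omega
  have hprodd : prodOf num d = nmin := by
    have hle : prodOf num d ≤ nmin := by
      unfold prodOf
      nlinarith [hmul]
    have := hall d (by omega) hcandd
    omega
  -- nmin ≤ (S+1)^2, so d ≤ S+1 and d lies in B's scanned range
  have hnumS : num ≤ (S + 1) * (S + 1) := by
    have := Nat.lt_succ_sqrt num.toNat
    have h' : (num.toNat : Int) < ((Nat.sqrt num.toNat + 1 : Nat) : Int) * ((Nat.sqrt num.toNat + 1 : Nat) : Int) := by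
      exact_mod_cast this
    push_cast at h'
    rw [hS]
    omega
  have hgoodS : good dist ((S + 1) * (S + 1)) := by
    rw [good_iff_qual dist _ (by nlinarith [hS ▸ Int.natCast_nonneg (Nat.sqrt num.toNat)])]
    refine ⟨S + 1, S + 1, ?_, le_refl _, by omega, rfl⟩
    have : (0:Int) ≤ S := hS ▸ Int.natCast_nonneg _
    omega
  have hnminS : nmin ≤ (S + 1) * (S + 1) := hmin _ hnumS hgoodS
  have hdS : d ≤ S + 1 := by
    have hcast : (((Nat.sqrt num.toNat + 1) * (Nat.sqrt num.toNat + 1) : Nat) : Int) = (S+1)*(S+1) := by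
      rw [hS]; push_cast; ring
    have h1 : nmin.toNat ≤ (Nat.sqrt num.toNat + 1) * (Nat.sqrt num.toNat + 1) :=
      Int.toNat_le.mpr (by omega)
    have h2 : Nat.sqrt nmin.toNat ≤ Nat.sqrt ((Nat.sqrt num.toNat + 1) * (Nat.sqrt num.toNat + 1)) :=
      Nat.sqrt_le_sqrt h1
    rw [Nat.sqrt_eq] at h2
    have h3 : d ≤ (Nat.sqrt nmin.toNat : Int) := hdsq
    rw [hS]
    omega
  -- split B's descending range around d
  have hsplit : PySem.List.pyRange (S + 1) 0 (-1) =
      (PySem.List.pyRange (d + 1) (S + 2) 1).reverse ++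
        d :: (PySem.List.pyRange 1 d 1).reverse := by
    rw [PySem.List.pyRange_neg_one_eq_reverse,
      show (0:Int) + 1 = 1 by ring, show S + 1 + 1 = S + 2 by ring,
      PySem.List.pyRange_one_append 1 d (S + 2) (by omega) (by omega),
      PySem.List.pyRange_one_cons (a := d) (b := S + 2) (by omega)]
    simp
  have hBfold : pvBFold num dist = some (nmin, d) := by
    unfold pvBFold
    rw [← hS, hsplit]
    apply fold_main
    · intro x hx hc
      rw [List.mem_reverse, PySem.List.mem_pyRange_one] at hx
      exact hstrict x (by omega) hc
    · intro x hx hc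
      rw [List.mem_reverse, PySem.List.mem_pyRange_one] at hx
      exact hall x (by omega) hc
    · exact hcandd
    · exact hprodd
  refine ⟨nmin, d, hBfold, ?_⟩
  rw [aloop_find dist 100000 num hn hq hfuel]

theorem subplot_dims_spec : Claim_equal_subplot_dims := by
  intro num layout dist hdom hpre
  obtain ⟨h1, hd0, hlay⟩ := hpre
  have hdom' : num ≤ 2147483648 := by
    have := hdom
    unfold Dom_subplot_dims pvDomInt at this
    simp at this
    omega
  set S : Int := (Nat.sqrt num.toNat : Int) with hS
  have hS0 : 0 ≤ S := hS ▸ Int.natCast_nonneg _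
  have hnumS : num ≤ (S + 1) * (S + 1) := by
    have := Nat.lt_succ_sqrt num.toNat
    have h' : (num.toNat : Int) < ((Nat.sqrt num.toNat + 1 : Nat) : Int) * ((Nat.sqrt num.toNat + 1 : Nat) : Int) := by
      exact_mod_cast this
    push_cast at h'
    rw [hS]
    omega
  have hgoodS : good dist ((S + 1) * (S + 1)) := by
    rw [good_iff_qual dist _ (by nlinarith)]
    exact ⟨S + 1, S + 1, by omega, le_refl _, by omega, rfl⟩
  have hq : ∃ m : Nat, good dist (num + m) := by
    refine ⟨((S + 1) * (S + 1) - num).toNat, ?_⟩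
    rw [show num + (((S + 1) * (S + 1) - num).toNat : Int) = (S + 1) * (S + 1) by omega]
    exact hgoodS
  have hfuel : Nat.find hq < 100000 := by
    have hle : Nat.find hq ≤ ((S + 1) * (S + 1) - num).toNat := Nat.find_min' hq (by
      rw [show num + (((S + 1) * (S + 1) - num).toNat : Int) = (S + 1) * (S + 1) by omega]
      exact hgoodS)
    have hssq : S * S ≤ num := by
      have h0 := Nat.sqrt_le' num.toNat
      have h' : ((Nat.sqrt num.toNat ^ 2 : Nat) : Int) ≤ (num.toNat : Int) :=
        Nat.cast_le.mpr h0
      rw [pow_two] at h'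
      have hnn : ((num.toNat : Nat) : Int) = num := by omega
      rw [hS]
      linarith
    have hSle : S ≤ 46340 := by
      have h2 : num.toNat < 46341 ^ 2 := by
        have : num.toNat ≤ 2147483648 := by omega
        omega
      have h3 := Nat.sqrt_lt'.mpr h2
      rw [hS]
      exact_mod_cast Nat.le_of_lt_succ (by omega)
    have hbound : ((S + 1) * (S + 1) - num).toNat ≤ 92681 := by
      have hI : (S + 1) * (S + 1) - num ≤ 92681 := by nlinarith
      generalize hgen : (S + 1) * (S + 1) - num = t at hI ⊢
      omega
    omega
  obtain ⟨p, a, hB, hA⟩ := main_loop_eq num dist h1 hd0 hq hfuel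
  unfold Spec_subplot_dims subplot_dims subplot_dims_alt
  rw [hA, hB]

theorem subplot_dims_raises : Claim_raises_subplot_dims := by
  unfold Claim_raises_subplot_dims
  constructor
  · rintro num layout dist _ ⟨h0, _⟩ ⟨h1, _⟩
    omega
  · refine ⟨by decide, by decide, by decide⟩

-- self-check: the raise-witness value pinned above is exactly what B's port returns there
theorem pvRaiseWitness_ok :
    subplot_dims_alt pvRaiseWitness_subplot_dims.1 pvRaiseWitness_subplot_dims.2.1
      pvRaiseWitness_subplot_dims.2.2 = pvRaiseWitnessOut_subplot_dims :=
  subplot_dims_raises.2.2.2
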